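-- pv_equiv track=rewrite | github.com/etilonii/FantaPortoscuso | apps/api/app/market_advisor/roles.py | best_role_from_set
-- ===== SOURCE A (Python) =====
-- from typing import Dict, Iterable, List, Optional, Set
--
-- FINAL_ROLES: Set[str] = {
--     "Por",
--     "Dc",
--     "Dd",
--     "Ds",
--     "B",
--     "E",
--     "M",
--     "C",
--     "T",
--     "W",
--     "A",
--     "Pc",
-- }
--
-- ROLE_PRIORITY: List[str] = [
--     "Por",
--     "Dc",
--     "Dd",
--     "Ds",
--     "B",
--     "E",
--     "M",
--     "C",
--     "T",
--     "W",
--     "A",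
--     "Pc",
-- ]
--
-- def best_role_from_set(roles: Iterable[str]) -> Optional[str]:
--     role_set = {role for role in roles if role in FINAL_ROLES}
--     if not role_set:
--         return None
--     if "Por" in role_set:
--         return "Por"
--     for role in ROLE_PRIORITY:
--         if role in role_set:
--             return role
--     return None
-- ===== SOURCE B (Python) =====
-- from typing import Dict, Iterable, List, Optional
--
-- ROLE_PRIORITY: List[str] = [
--     "Por",
--     "Dc",
--     "Dd",
--     "Ds",
--     "B",
--     "E",
--     "M",
--     "C",
--     "T",
--     "W",
--     "A",
--     "Pc",
-- ]
--
-- _PRIO_INDEX: Dict[str, int] = {role: i for i, role in enumerate(ROLE_PRIORITY)}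
--
-- def best_role_from_set(roles: Iterable[str]) -> Optional[str]:
--     best = None
--     for role in roles:
--         idx = _PRIO_INDEX.get(role)
--         if idx is not None and (best is None or idx < best):
--             best = idx
--     return None if best is None else ROLE_PRIORITY[best]
-- ===== Notes on version B (the rewrite author's own statement) =====
-- stated objective: alternative
-- what changed: Instead of building an intermediate set of valid roles and then scanning the fixed priority list for the first member, B makes a single pass over the input, looking each role up in a precomputed role-to-priority-index dict and keeping the running minimum index, returning ROLE_PRIORITY[best] at the end.
import Mathlib
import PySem

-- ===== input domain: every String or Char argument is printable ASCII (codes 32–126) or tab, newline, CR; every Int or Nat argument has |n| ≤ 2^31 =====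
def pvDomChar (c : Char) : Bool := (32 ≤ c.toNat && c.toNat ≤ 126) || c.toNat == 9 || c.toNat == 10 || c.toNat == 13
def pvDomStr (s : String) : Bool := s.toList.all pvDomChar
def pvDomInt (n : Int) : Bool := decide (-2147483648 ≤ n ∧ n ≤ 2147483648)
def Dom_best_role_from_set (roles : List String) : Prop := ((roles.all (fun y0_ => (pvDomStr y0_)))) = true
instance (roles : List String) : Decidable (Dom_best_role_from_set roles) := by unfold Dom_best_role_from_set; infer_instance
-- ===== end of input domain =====

-- B replaces A's build-a-set-then-scan-the-priority-list strategy by a single pass over the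
-- input keeping a running minimum priority index (alternative decomposition, similar cost).

-- ===== PORT A =====
def FINAL_ROLES : PySem.Set String :=
  PySem.Set.ofList ["Por", "Dc", "Dd", "Ds", "B", "E", "M", "C", "T", "W", "A", "Pc"]

def ROLE_PRIORITY : List String :=
  ["Por", "Dc", "Dd", "Ds", "B", "E", "M", "C", "T", "W", "A", "Pc"]

-- A's 'for role in ROLE_PRIORITY: if role in role_set: return role' loop
def aLoop (role_set : PySem.Set String) : List String → Option String
  | [] => none
  | p :: ps => if PySem.Set.contains role_set p then some p else aLoop role_set ps

def best_role_from_set (roles : List String) : Option String :=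
  let role_set : PySem.Set String :=
    PySem.Set.ofList (roles.filter (fun role => PySem.Set.contains FINAL_ROLES role))
  if role_set.isEmpty then none
  else if PySem.Set.contains role_set "Por" then "Por"
  else aLoop role_set ROLE_PRIORITY

-- ===== PORT B =====
-- _PRIO_INDEX = {role: i for i, role in enumerate(ROLE_PRIORITY)}
def PRIO_INDEX : PySem.Dict String Int :=
  (PySem.List.enumerate ROLE_PRIORITY).foldl (fun d p => d.insert p.2 p.1) PySem.Dict.empty

-- body of B's 'for role in roles' loop
def bStep (best : Option Int) (role : String) : Option Int :=
  match PySem.Dict.get? PRIO_INDEX role with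
  | none => best
  | some idx =>
    match best with
    | none => some idx
    | some b => if idx < b then some idx else best

def best_role_from_set_alt (roles : List String) : Option String :=
  match roles.foldl bStep none with
  | none => none
  | some b => PySem.List.pyGet? ROLE_PRIORITY b

-- ===== PRECONDITION & SPEC =====
def Spec_best_role_from_set (roles : List String) (out : Option String) : Prop := out = best_role_from_set_alt roles
instance (roles : List String) (out : Option String) : Decidable (Spec_best_role_from_set roles out) := by unfold Spec_best_role_from_set; infer_instance

-- ===== CLAIM (what is proved, stated in full; the proofs are below) =====
def Claim_equal_best_role_from_set : Prop := ∀ (roles : List String), Dom_best_role_from_set roles → Spec_best_role_from_set roles (best_role_from_set roles)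

-- ===== LEMMAS AND PROOFS =====

-- index of r in P (first match), as B's dict lookup computes it
def idxIn : List String → String → Option Int
  | [], _ => none
  | p :: ps, r => if r = p then some 0 else (idxIn ps r).map (· + 1)

-- B's running minimum over the input, relative to a priority list P
def minIdx (P : List String) (roles : List String) : Option Int :=
  roles.foldl (fun b r => Option.merge min b (idxIn P r)) none

theorem idxIn_nonneg (P : List String) (r : String) (i : Int) (h : idxIn P r = some i) : 0 ≤ i := by
  induction P generalizing i with
  | nil => simp [idxIn] at h
  | cons p ps ih =>
    simp only [idxIn] at h
    split at h
    · simp at h; omega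
    · cases hj : idxIn ps r with
      | none => rw [hj] at h; simp at h
      | some j => rw [hj] at h; simp at h; have := ih j hj; omega

theorem merge_min_assoc (a b c : Option Int) :
    Option.merge min (Option.merge min a b) c = Option.merge min a (Option.merge min b c) := by
  cases a <;> cases b <;> cases c <;> simp [Option.merge, min_assoc]

theorem merge_min_map_add_one (a b : Option Int) :
    Option.merge min (a.map (· + 1)) (b.map (· + 1)) = (Option.merge min a b).map (· + 1) := by
  cases a <;> cases b <;> simp [Option.merge, Int.min_def] <;> split_ifs <;> omega

theorem foldl_merge (f : String → Option Int) (roles : List String) (best : Option Int) :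
    roles.foldl (fun b r => Option.merge min b (f r)) best
      = Option.merge min best (roles.foldl (fun b r => Option.merge min b (f r)) none) := by
  induction roles generalizing best with
  | nil => cases best <;> simp [Option.merge]
  | cons r rs ih =>
    simp only [List.foldl]
    rw [ih (Option.merge min best (f r)), ih (Option.merge min none (f r))]
    rw [← merge_min_assoc]
    congr 1
    cases f r <;> cases best <;> simp [Option.merge]

theorem minIdx_cons (P : List String) (r : String) (rs : List String) :
    minIdx P (r :: rs) = Option.merge min (idxIn P r) (minIdx P rs) := by
  unfold minIdx
  simp only [List.foldl]
  rw [foldl_merge]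
  cases idxIn P r <;> simp [Option.merge]

theorem minIdx_nonneg (P : List String) (roles : List String) (i : Int) (h : minIdx P roles = some i) : 0 ≤ i := by
  induction roles generalizing i with
  | nil => simp [minIdx] at h
  | cons r rs ih =>
    rw [minIdx_cons] at h
    cases ha : idxIn P r <;> cases hb : minIdx P rs <;>
      rw [ha, hb] at h <;> simp [Option.merge] at h
    · exact h ▸ ih _ hb
    · exact h ▸ idxIn_nonneg P r _ ha
    · have h1 := idxIn_nonneg P r _ ha
      have h2 := ih _ hb
      omega

theorem minIdx_nil (roles : List String) : minIdx [] roles = none := by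
  induction roles with
  | nil => rfl
  | cons r rs ih => rw [minIdx_cons, ih]; simp [idxIn, Option.merge]

theorem minIdx_structure (p : String) (ps : List String) (roles : List String) :
    minIdx (p :: ps) roles =
      if roles.contains p then some 0 else (minIdx ps roles).map (· + 1) := by
  induction roles with
  | nil => simp [minIdx]
  | cons r rs ih =>
    rw [minIdx_cons, ih, minIdx_cons]
    by_cases hrp : r = p
    · subst hrp
      simp only [idxIn, List.contains_cons, BEq.rfl, Bool.true_or, if_pos]
      by_cases hc : rs.contains r
      · rw [if_pos hc]; simp [Option.merge]
      · rw [if_neg hc]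
        cases hm : minIdx ps rs with
        | none => simp [Option.merge]
        | some b =>
          have := minIdx_nonneg ps rs b hm
          simp [Option.merge]; omega
    · have hcc : (r :: rs).contains p = rs.contains p := by
        simp [Ne.symm hrp]
      rw [hcc]
      simp only [idxIn, if_neg hrp]
      by_cases hc : rs.contains p
      · rw [if_pos hc, if_pos hc]
        cases hi : idxIn ps r with
        | none => simp [Option.merge]
        | some a =>
          have := idxIn_nonneg ps r a hi
          simp [Option.merge]; omega
      · rw [if_neg hc, if_neg hc]
        rw [merge_min_map_add_one]

theorem pyGet_succ (p : String) (ps : List String) (b : Int) (hb : 0 ≤ b) :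
    PySem.List.pyGet? (p :: ps) (b + 1) = PySem.List.pyGet? ps b := by
  obtain ⟨n, rfl⟩ : ∃ n : Nat, b = (n : Int) := ⟨b.toNat, (Int.toNat_of_nonneg hb).symm⟩
  have : ((n : Int) + 1) = ((n + 1 : Nat) : Int) := by push_cast; ring
  rw [this, PySem.List.pyGet?_natCast, PySem.List.pyGet?_natCast]
  simp

theorem minIdx_get_eq_find (P : List String) (roles : List String) :
    (match minIdx P roles with
      | none => none
      | some b => PySem.List.pyGet? P b)
      = List.find? (fun p => roles.contains p) P := by
  induction P with
  | nil => rw [minIdx_nil]; rfl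
  | cons p ps ih =>
    rw [minIdx_structure]
    by_cases hc : roles.contains p
    · rw [if_pos hc]
      have h0 : PySem.List.pyGet? (p :: ps) 0 = some p := by
        have := PySem.List.pyGet?_natCast (p :: ps) 0
        simpa using this
      rw [List.find?]
      simp only [hc, h0]
    · rw [if_neg hc]
      rw [List.find?]
      simp only [hc]
      rw [← ih]
      cases hm : minIdx ps roles with
      | none => rfl
      | some b =>
        simp only [Option.map_some]
        exact pyGet_succ p ps b (minIdx_nonneg ps roles b hm)

theorem get?_PRIO_INDEX' (r : String) :
    PySem.Dict.get? PRIO_INDEX r = idxIn ROLE_PRIORITY r := by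
  have h : PRIO_INDEX.items = [("Por",0),("Dc",1),("Dd",2),("Ds",3),("B",4),("E",5),("M",6),("C",7),("T",8),("W",9),("A",10),("Pc",11)] := by decide
  simp only [PySem.Dict.get?, h]
  by_cases h0 : r = "Por"
  · subst h0; decide
  by_cases h1 : r = "Dc"
  · subst h1; decide
  by_cases h2 : r = "Dd"
  · subst h2; decide
  by_cases h3 : r = "Ds"
  · subst h3; decide
  by_cases h4 : r = "B"
  · subst h4; decide
  by_cases h5 : r = "E"
  · subst h5; decide
  by_cases h6 : r = "M"
  · subst h6; decide
  by_cases h7 : r = "C"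
  · subst h7; decide
  by_cases h8 : r = "T"
  · subst h8; decide
  by_cases h9 : r = "W"
  · subst h9; decide
  by_cases h10 : r = "A"
  · subst h10; decide
  by_cases h11 : r = "Pc"
  · subst h11; decide
  have e0 : (("Por":String) == r) = false := beq_eq_false_iff_ne.mpr (Ne.symm h0)
  have e1 : (("Dc":String) == r) = false := beq_eq_false_iff_ne.mpr (Ne.symm h1)
  have e2 : (("Dd":String) == r) = false := beq_eq_false_iff_ne.mpr (Ne.symm h2)
  have e3 : (("Ds":String) == r) = false := beq_eq_false_iff_ne.mpr (Ne.symm h3)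
  have e4 : (("B":String) == r) = false := beq_eq_false_iff_ne.mpr (Ne.symm h4)
  have e5 : (("E":String) == r) = false := beq_eq_false_iff_ne.mpr (Ne.symm h5)
  have e6 : (("M":String) == r) = false := beq_eq_false_iff_ne.mpr (Ne.symm h6)
  have e7 : (("C":String) == r) = false := beq_eq_false_iff_ne.mpr (Ne.symm h7)
  have e8 : (("T":String) == r) = false := beq_eq_false_iff_ne.mpr (Ne.symm h8)
  have e9 : (("W":String) == r) = false := beq_eq_false_iff_ne.mpr (Ne.symm h9)
  have e10 : (("A":String) == r) = false := beq_eq_false_iff_ne.mpr (Ne.symm h10)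
  have e11 : (("Pc":String) == r) = false := beq_eq_false_iff_ne.mpr (Ne.symm h11)
  simp [List.find?, ROLE_PRIORITY, idxIn, e0, e1, e2, e3, e4, e5, e6, e7, e8, e9, e10, e11, h0, h1, h2, h3, h4, h5, h6, h7, h8, h9, h10, h11]

theorem bStep_eq (best : Option Int) (r : String) :
    bStep best r = Option.merge min best (idxIn ROLE_PRIORITY r) := by
  unfold bStep
  rw [get?_PRIO_INDEX']
  cases idxIn ROLE_PRIORITY r <;> cases best <;> simp [Option.merge]
  rename_i b idx
  rw [Int.min_def]
  split_ifs <;> first | rfl | omega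

theorem alt_eq_find (roles : List String) :
    best_role_from_set_alt roles = List.find? (fun p => roles.contains p) ROLE_PRIORITY := by
  unfold best_role_from_set_alt
  have hf : roles.foldl bStep none = minIdx ROLE_PRIORITY roles := by
    unfold minIdx
    congr 1
    funext b r
    exact bStep_eq b r
  rw [hf]
  exact minIdx_get_eq_find ROLE_PRIORITY roles

theorem contains_role_set (roles : List String) (p : String) :
    PySem.Set.contains (PySem.Set.ofList (roles.filter (fun role => PySem.Set.contains FINAL_ROLES role))) p
      = (roles.contains p && PySem.Set.contains FINAL_ROLES p) := by
  rw [PySem.Set.contains, List.contains_eq_mem, List.contains_eq_mem]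
  by_cases hp : p ∈ roles.filter (fun role => PySem.Set.contains FINAL_ROLES role)
  · have h1 : p ∈ roles ∧ PySem.Set.contains FINAL_ROLES p = true := by
      simpa [List.mem_filter] using hp
    simp [PySem.Set.mem_ofList, h1.1]
  · have h1 : ¬ (p ∈ roles ∧ PySem.Set.contains FINAL_ROLES p = true) := by
      simpa [List.mem_filter] using hp
    have hof : ¬ p ∈ PySem.Set.ofList (roles.filter (fun role => PySem.Set.contains FINAL_ROLES role)) := by
      rw [PySem.Set.mem_ofList]; exact hp
    rw [decide_eq_false hof]
    by_cases hm : p ∈ roles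
    · have hF : PySem.Set.contains FINAL_ROLES p = false := by
        cases h : PySem.Set.contains FINAL_ROLES p
        · rfl
        · exact absurd ⟨hm, h⟩ h1
      have hF' : p ∉ (FINAL_ROLES : List String) := by
        rw [PySem.Set.contains, List.contains_eq_mem] at hF
        exact of_decide_eq_false hF
      simp [hF', hm]
    · simp [hm]

theorem aLoop_eq (s : PySem.Set String) (roles : List String)
    (hs : ∀ p, PySem.Set.contains s p = (roles.contains p && PySem.Set.contains FINAL_ROLES p)) :
    ∀ P : List String, (∀ p ∈ P, PySem.Set.contains FINAL_ROLES p = true) →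
      aLoop s P = List.find? (fun p => roles.contains p) P := by
  intro P
  induction P with
  | nil => intro _; rfl
  | cons p ps ih =>
    intro hP
    rw [aLoop, List.find?]
    have : PySem.Set.contains s p = roles.contains p := by
      rw [hs p, hP p (by simp), Bool.and_true]
    rw [this]
    cases roles.contains p
    · simpa using ih (fun q hq => hP q (by simp [hq]))
    · rfl

theorem a_eq_find (roles : List String) :
    best_role_from_set roles = List.find? (fun p => roles.contains p) ROLE_PRIORITY := by
  unfold best_role_from_set
  simp only []
  set rs := PySem.Set.ofList (roles.filter (fun role => PySem.Set.contains FINAL_ROLES role)) with hrs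
  have hconv : ∀ p, PySem.Set.contains rs p = (roles.contains p && PySem.Set.contains FINAL_ROLES p) :=
    fun p => contains_role_set roles p
  by_cases hemp : rs.isEmpty
  · rw [if_pos hemp]
    have hnil : rs = [] := List.isEmpty_iff.mp hemp
    have hall : ∀ p, PySem.Set.contains FINAL_ROLES p = true → ¬ p ∈ roles := by
      intro p hF
      have hx := hconv p
      rw [hnil, hF, Bool.and_true] at hx
      have hc : roles.contains p = false := by simpa [PySem.Set.contains] using hx.symm
      intro hm
      rw [List.contains_eq_mem, decide_eq_true hm] at hc
      exact absurd hc (by decide)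
    have c0 := hall "Por" (by decide)
    have c1 := hall "Dc" (by decide)
    have c2 := hall "Dd" (by decide)
    have c3 := hall "Ds" (by decide)
    have c4 := hall "B" (by decide)
    have c5 := hall "E" (by decide)
    have c6 := hall "M" (by decide)
    have c7 := hall "C" (by decide)
    have c8 := hall "T" (by decide)
    have c9 := hall "W" (by decide)
    have c10 := hall "A" (by decide)
    have c11 := hall "Pc" (by decide)
    simp [ROLE_PRIORITY, List.find?, c0, c1, c2, c3, c4, c5, c6, c7, c8, c9, c10, c11]
  · rw [if_neg hemp]
    by_cases hpor : PySem.Set.contains rs "Por"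
    · rw [if_pos hpor]
      have : roles.contains "Por" = true := by
        have := hconv "Por"
        rw [hpor] at this
        cases h : roles.contains "Por"
        · rw [h] at this; simp at this
        · rfl
      rw [ROLE_PRIORITY, List.find?]
      simp only [this]
    · rw [if_neg hpor]
      exact aLoop_eq rs roles hconv ROLE_PRIORITY (by decide)

-- ===== VERDICT (by name: the statement is the Claim_ definition above) =====
theorem best_role_from_set_spec : Claim_equal_best_role_from_set := by
  intro roles _
  unfold Spec_best_role_from_set
  rw [a_eq_find, alt_eq_find]
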